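-- pv_equiv track=rewrite | github.com/JorgeArguello1999/PUCESA_Programacion | RDA2/Ejer_4/main.py | busqueda_binaria_nombre
-- ===== SOURCE A (Python) =====
-- def busqueda_binaria_nombre(lista_ordenada, nombre_buscado):
--     """Realiza búsqueda binaria por nombre en lista ordenada"""
--     izquierda = 0
--     derecha = len(lista_ordenada) - 1
--     comparaciones = 0
--
--     while izquierda <= derecha:
--         medio = (izquierda + derecha) // 2
--         comparaciones += 1
--
--         if lista_ordenada[medio][0] == nombre_buscado:
--             return medio, comparaciones, True
--         elif lista_ordenada[medio][0] < nombre_buscado: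
--             izquierda = medio + 1
--         else:
--             derecha = medio - 1
--
--     return -1, comparaciones, False
-- ===== SOURCE B (Python) =====
-- def busqueda_binaria_nombre(lista_ordenada, nombre_buscado):
--     """Busqueda binaria por divide y venceras sobre rebanadas de la lista,
--     llevando un desplazamiento para reconstruir el indice original."""
--     def go(sub, offset, comps):
--         if not sub:
--             return -1, comps, False
--         m = (len(sub) - 1) // 2
--         nombre = sub[m][0]
--         if nombre == nombre_buscado:
--             return offset + m, comps + 1, True
--         if nombre < nombre_buscado:
--             return go(sub[m + 1:], offset + m + 1, comps + 1)
--         return go(sub[:m], offset, comps + 1)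
--     return go(lista_ordenada, 0, 0)
-- ===== Notes on version B (the rewrite author's own statement) =====
-- stated objective: alternative
-- what changed: A's while-loop over an (izquierda, derecha) index pair into the original list is replaced by divide-and-conquer recursion on the sub-list itself: each step probes the middle of the current slice and recurses on sub[m+1:] or sub[:m], carrying an offset to reconstruct the original index.
import Mathlib
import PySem

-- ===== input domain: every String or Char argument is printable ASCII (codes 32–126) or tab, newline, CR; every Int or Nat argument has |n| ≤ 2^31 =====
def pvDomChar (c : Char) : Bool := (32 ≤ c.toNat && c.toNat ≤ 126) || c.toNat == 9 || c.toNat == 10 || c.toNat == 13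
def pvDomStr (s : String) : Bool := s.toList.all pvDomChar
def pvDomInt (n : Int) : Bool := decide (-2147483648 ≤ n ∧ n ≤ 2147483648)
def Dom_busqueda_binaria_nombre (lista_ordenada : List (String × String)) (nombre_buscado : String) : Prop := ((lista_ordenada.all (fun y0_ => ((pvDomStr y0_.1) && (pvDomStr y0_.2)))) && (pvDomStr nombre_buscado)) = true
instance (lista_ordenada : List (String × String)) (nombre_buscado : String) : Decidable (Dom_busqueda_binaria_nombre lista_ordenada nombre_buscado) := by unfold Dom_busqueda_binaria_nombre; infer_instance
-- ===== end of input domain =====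

-- B replaces A's index-pair while-loop with divide-and-conquer recursion on list
-- slices carrying an offset; same exact result and comparison count. (objective: alternative)

-- ===== PORT A =====
-- Python string 'a < b' is ported as code-point '<' on .toList (exact per PySem).
-- A's while-loop as fuel recursion (fuel = len+1 always suffices: the interval
-- shrinks every iteration, so the fuel-out case is unreachable from the entry
-- point; it is only a totality guard). lista_ordenada[medio] is exact: medio is
-- in range whenever that line runs (0 ≤ izq ≤ medio ≤ der < len), so the
-- .getD default is never taken.
def bbLoopA (l : List (String × String)) (n : String) :
    Nat → Int → Int → Int → Int × Int × Bool
  | 0, _, _, comp => (-1, comp, false)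
  | fuel + 1, izq, der, comp =>
    if izq ≤ der then
      let medio := PySem.Int.floordiv (izq + der) 2
      let comp' := comp + 1
      let nombre := ((PySem.List.pyGet? l medio).getD ("", "")).1
      if nombre = n then (medio, comp', true)
      else if nombre.toList < n.toList then bbLoopA l n fuel (medio + 1) der comp'
      else bbLoopA l n fuel izq (medio - 1) comp'
    else (-1, comp, false)

def busqueda_binaria_nombre (lista_ordenada : List (String × String)) (nombre_buscado : String) : Int × Int × Bool :=
  bbLoopA lista_ordenada nombre_buscado (lista_ordenada.length + 1) 0 ((lista_ordenada.length : Int) - 1) 0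

-- ===== PORT B =====
-- B's go(sub, offset, comps): structural recursion on the slice itself (drop/take
-- are Python's sub[m+1:] / sub[:m]); terminates because the slice shrinks.
-- sub[m] is exact: m = (len-1)//2 < len on a nonempty slice, so getD's default
-- is never taken.
def bbGoB (n : String) (sub : List (String × String)) (offset : Int) (comps : Int) :
    Int × Int × Bool :=
  if h : sub = [] then (-1, comps, false)
  else
    let m := (sub.length - 1) / 2
    let nombre := (sub.getD m ("", "")).1
    if nombre = n then (offset + (m : Int), comps + 1, true)
    else if nombre.toList < n.toList then
      bbGoB n (sub.drop (m + 1)) (offset + (m : Int) + 1) (comps + 1)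
    else
      bbGoB n (sub.take m) offset (comps + 1)
termination_by sub.length
decreasing_by
  · have hs : sub.length ≠ 0 := by simpa [List.length_eq_zero_iff] using h
    simp; omega
  · have hs : sub.length ≠ 0 := by simpa [List.length_eq_zero_iff] using h
    simp; omega

def busqueda_binaria_nombre_alt (lista_ordenada : List (String × String)) (nombre_buscado : String) : Int × Int × Bool :=
  bbGoB nombre_buscado lista_ordenada 0 0

-- ===== PRECONDITION & SPEC =====
def Spec_busqueda_binaria_nombre (lista_ordenada : List (String × String)) (nombre_buscado : String) (out : Int × Int × Bool) : Prop := out = busqueda_binaria_nombre_alt lista_ordenada nombre_buscado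
instance (lista_ordenada : List (String × String)) (nombre_buscado : String) (out : Int × Int × Bool) : Decidable (Spec_busqueda_binaria_nombre lista_ordenada nombre_buscado out) := by unfold Spec_busqueda_binaria_nombre; infer_instance

-- ===== CLAIM (what is proved, stated in full; the proofs are below) =====
def Claim_equal_busqueda_binaria_nombre : Prop := ∀ (lista_ordenada : List (String × String)) (nombre_buscado : String), Dom_busqueda_binaria_nombre lista_ordenada nombre_buscado → Spec_busqueda_binaria_nombre lista_ordenada nombre_buscado (busqueda_binaria_nombre lista_ordenada nombre_buscado)

-- ===== LEMMAS AND PROOFS =====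

-- A's loop on the interval [off, off+k-1] equals B's recursion on the slice
-- (l.drop off).take k with offset off, provided the interval fits in l and the
-- fuel exceeds the interval length. Induction on fuel.
theorem bbLoopA_eq_bbGoB (l : List (String × String)) (n : String) :
    ∀ (fuel off k : Nat) (comps : Int),
      off + k ≤ l.length → k + 1 ≤ fuel →
      bbLoopA l n fuel (off : Int) ((off : Int) + (k : Int) - 1) comps
        = bbGoB n ((l.drop off).take k) off comps := by
  intro fuel
  induction fuel with
  | zero => intro off k comps _ hf; omega
  | succ fuel ih =>
    intro off k comps hlen _hf
    match k with
    | 0 =>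
      rw [bbLoopA, bbGoB]
      simp
    | k + 1 =>
      have hkpos : (0 : Int) ≤ k := by positivity
      rw [bbLoopA, bbGoB]
      set sub := (l.drop off).take (k + 1) with hsub
      have hsublen : sub.length = k + 1 := by
        simp [hsub]; omega
      have hne : ¬ sub = [] := by
        intro hnil; rw [hnil] at hsublen; simp at hsublen
      rw [dif_neg hne]
      have hle : ((off : Int) ≤ (off : Int) + (↑(k + 1) : Int) - 1) := by push_cast; omega
      rw [if_pos hle]
      -- the midpoints agree: (off + (off+k)) // 2 = off + k/2 (Nat division)
      have hm : PySem.Int.floordiv ((off : Int) + ((off : Int) + (↑(k + 1) : Int) - 1)) 2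
          = ((off + k / 2 : Nat) : Int) := by
        have : ((off : Int) + ((off : Int) + (↑(k + 1) : Int) - 1)) = 2 * off + k := by
          push_cast; ring
        rw [this, PySem.Int.floordiv, Int.fdiv_eq_ediv]
        simp only [Int.dvd_iff_emod_eq_zero]
        omega
      rw [hm]
      have hmlen : (sub.length - 1) / 2 = k / 2 := by rw [hsublen]; simp
      -- the probed entries agree
      have hidx : ((PySem.List.pyGet? l ((off + k / 2 : Nat) : Int)).getD ("", "")).1
          = (sub.getD (k / 2) ("", "")).1 := by
        rw [PySem.List.pyGet?_natCast]
        have hin : off + k / 2 < l.length := by omega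
        have hin2 : k / 2 < sub.length := by omega
        rw [List.getElem?_eq_getElem hin, List.getD_eq_getElem?_getD,
            List.getElem?_eq_getElem hin2]
        simp [hsub]
      simp only [hmlen, hidx]
      by_cases heq : (sub.getD (k / 2) ("", "")).1 = n
      · rw [if_pos heq, if_pos heq]
        push_cast
        rfl
      · rw [if_neg heq, if_neg heq]
        by_cases hlt : (sub.getD (k / 2) ("", "")).1.toList < n.toList
        · rw [if_pos hlt, if_pos hlt]
          -- right half: offset off + k/2 + 1, length k - k/2
          have h1 : ((off + k / 2 : Nat) : Int) + 1 = (((off + k / 2 + 1 : Nat)) : Int) := by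
            push_cast; ring
          have h2 : (off : Int) + (↑(k + 1) : Int) - 1
              = ((off + k / 2 + 1 : Nat) : Int) + ((k - k / 2 : Nat) : Int) - 1 := by
            push_cast; omega
          rw [h1, h2, ih (off + k / 2 + 1) (k - k / 2) (comps + 1) (by omega) (by omega),
              hsub, List.drop_take, List.drop_drop]
          have e1 : k + 1 - (k / 2 + 1) = k - k / 2 := by omega
          have e2 : off + (k / 2 + 1) = off + k / 2 + 1 := by omega
          have e3 : (off : Int) + ((k / 2 : Nat) : Int) + 1
              = ((off + k / 2 + 1 : Nat) : Int) := by push_cast; ring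
          rw [e1, e2, e3]
        · rw [if_neg hlt, if_neg hlt]
          -- left half: offset off, length k/2
          have h2 : ((off + k / 2 : Nat) : Int) - 1
              = (off : Int) + ((k / 2 : Nat) : Int) - 1 := by push_cast; ring
          rw [h2, ih off (k / 2) (comps + 1) (by omega) (by omega)]
          congr 1
          rw [hsub, List.take_take]
          congr 1
          omega

-- ===== VERDICT (by name: the statement is the Claim_ definition above) =====
theorem busqueda_binaria_nombre_spec : Claim_equal_busqueda_binaria_nombre := by
  intro l n _
  unfold Spec_busqueda_binaria_nombre busqueda_binaria_nombre busqueda_binaria_nombre_alt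
  have := bbLoopA_eq_bbGoB l n (l.length + 1) 0 l.length 0 (by omega) (by omega)
  simpa using this
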